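-- pv_equiv track=rewrite | github.com/anishfelixm/100daysofCP | python/56a_1303A_ErasingZeroes.py | solve
-- ===== SOURCE A (Python) =====
-- def solve(s):
--     start, cnt = -1, 0
--     for i in range(1, len(s)):
--         if s[i] == '0' and s[i-1] == '1':
--             start = i
--         elif s[i] == '1' and s[i-1] == '0':
--             if start is not -1:
--                 cnt += (i - start)
--                 start = -1
--     return cnt
-- ===== SOURCE B (Python) =====
-- def solve(s):
--     # Build the list of '1'->'0' and '0'->'1' transition events, then sum the
--     # gap of each adjacent (down, up) event pair.
--     events = [(i, s[i]) for i in range(1, len(s))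
--               if (s[i - 1], s[i]) in (('1', '0'), ('0', '1'))]
--     total = 0
--     k = 0
--     while k < len(events):
--         if k + 1 < len(events) and events[k][1] == '0' and events[k + 1][1] == '1':
--             total += events[k + 1][0] - events[k][0]
--             k += 2
--         else:
--             k += 1
--     return total
-- ===== Notes on version B (the rewrite author's own statement) =====
-- stated objective: alternative
-- what changed: Replaced A's per-character state machine (pending start index + running count) by a two-phase computation: build the list of '1'->'0' and '0'->'1' transition events once, then sum the gaps of adjacent (down, up) event pairs.
import Mathlib
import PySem

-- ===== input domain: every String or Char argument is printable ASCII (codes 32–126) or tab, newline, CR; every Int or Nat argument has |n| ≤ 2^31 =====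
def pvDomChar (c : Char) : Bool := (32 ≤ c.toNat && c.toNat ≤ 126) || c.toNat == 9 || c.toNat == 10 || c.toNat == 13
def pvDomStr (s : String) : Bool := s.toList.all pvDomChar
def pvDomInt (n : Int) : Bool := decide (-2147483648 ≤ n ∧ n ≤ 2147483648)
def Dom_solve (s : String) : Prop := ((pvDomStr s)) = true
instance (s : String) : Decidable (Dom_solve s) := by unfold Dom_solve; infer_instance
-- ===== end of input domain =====

-- B computes the same count from a transition-event list summed in adjacent (down, up)
-- pairs, instead of A's per-character state machine (objective: alternative decomposition).

-- ===== PORT A =====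
-- the loop body of A: state (start, cnt); g i is s[i]
def stepA (g : Int → Option Char) (p : Int × Int) (i : Int) : Int × Int :=
  if g i = some '0' ∧ g (i - 1) = some '1' then
    (i, p.2)
  else if g i = some '1' ∧ g (i - 1) = some '0' then
    (if p.1 ≠ -1 then (-1, p.2 + (i - p.1)) else p)
  else p

def solve (s : String) : Int :=
  ((PySem.List.pyRange 1 (PySem.Str.len s) 1).foldl (stepA (PySem.Str.pyGet? s)) (-1, 0)).2

-- ===== PORT B =====
-- the comprehension body of B: classify index i as a transition event (i, s[i]) or not
def clsB (g : Int → Option Char) (i : Int) : Option (Int × Char) :=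
  match g (i - 1), g i with
  | some a, some b =>
      if (a, b) = ('1', '0') ∨ (a, b) = ('0', '1') then some (i, b) else none
  | _, _ => none

-- the while loop of B: consume adjacent (down, up) event pairs
def pairSum : List (Int × Char) → Int
  | [] => 0
  | [_] => 0
  | x :: y :: rest =>
      if x.2 = '0' ∧ y.2 = '1' then (y.1 - x.1) + pairSum rest
      else pairSum (y :: rest)

def solve_alt (s : String) : Int :=
  pairSum ((PySem.List.pyRange 1 (PySem.Str.len s) 1).filterMap (clsB (PySem.Str.pyGet? s)))

-- ===== PRECONDITION & SPEC =====
def Spec_solve (s : String) (out : Int) : Prop := out = solve_alt s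
instance (s : String) (out : Int) : Decidable (Spec_solve s out) := by unfold Spec_solve; infer_instance

-- ===== CLAIM (what is proved, stated in full; the proofs are below) =====
def Claim_equal_solve : Prop := ∀ (s : String), Dom_solve s → Spec_solve s (solve s)

-- ===== LEMMAS AND PROOFS =====

lemma pairSum_notdown_cons (x : Int × Char) (L : List (Int × Char)) (h : x.2 ≠ '0') :
    pairSum (x :: L) = pairSum L := by
  cases L with
  | nil => simp [pairSum]
  | cons y rest => simp [pairSum, h]

lemma pairSum_down_down (d : Int) (x : Int × Char) (L : List (Int × Char)) (h : x.2 ≠ '1') :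
    pairSum ((d, '0') :: x :: L) = pairSum (x :: L) := by
  simp [pairSum, h]

-- the invariant: A's loop from state (start, cnt) = cnt + B's pair sum of the pending
-- down event (if any) followed by the events of the remaining indices
lemma loopA_eq (g : Int → Option Char) (idxs : List Int) (start cnt : Int)
    (hpos : ∀ i ∈ idxs, i ≠ -1) :
    (idxs.foldl (stepA g) (start, cnt)).2
      = cnt + pairSum ((if start = -1 then [] else [(start, '0')])
                        ++ idxs.filterMap (clsB g)) := by
  induction idxs generalizing start cnt with
  | nil =>
      split_ifs <;> simp [pairSum]
  | cons i rest ih =>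
      have hi : i ≠ -1 := hpos i (by simp)
      have hrest : ∀ j ∈ rest, j ≠ -1 := fun j hj => hpos j (by simp [hj])
      simp only [List.foldl_cons, List.filterMap_cons]
      rcases hga : g (i - 1) with _ | a <;> rcases hgb : g i with _ | b
      · rw [show stepA g (start, cnt) i = (start, cnt) by simp [stepA, hga, hgb],
            show clsB g i = none by simp [clsB, hga, hgb]]
        exact ih _ _ hrest
      · rw [show stepA g (start, cnt) i = (start, cnt) by simp [stepA, hga, hgb],
            show clsB g i = none by simp [clsB, hga, hgb]]
        exact ih _ _ hrest
      · rw [show stepA g (start, cnt) i = (start, cnt) by simp [stepA, hga, hgb],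
            show clsB g i = none by simp [clsB, hga, hgb]]
        exact ih _ _ hrest
      · by_cases hb0 : b = '0'
        · subst hb0
          by_cases ha1 : a = '1'
          · subst ha1
            -- down event: start := i
            rw [show stepA g (start, cnt) i = (i, cnt) by simp [stepA, hga, hgb],
                show clsB g i = some (i, '0') by simp [clsB, hga, hgb],
                ih _ _ hrest, if_neg hi]
            by_cases hstart : start = -1
            · rw [if_pos hstart]; simp
            · rw [if_neg hstart]
              show cnt + pairSum ((i, '0') :: rest.filterMap (clsB g))
                  = cnt + pairSum ((start, '0') :: (i, '0') :: rest.filterMap (clsB g))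
              rw [pairSum_down_down _ _ _ (by simp)]
          · -- (a, '0') with a ≠ '1': no event, no branch fires
            rw [show stepA g (start, cnt) i = (start, cnt) by simp [stepA, hga, hgb, ha1],
                show clsB g i = none by simp [clsB, hga, hgb, ha1]]
            exact ih _ _ hrest
        · by_cases hb1 : b = '1'
          · subst hb1
            by_cases ha0 : a = '0'
            · subst ha0
              -- up event
              rw [show clsB g i = some (i, '1') by simp [clsB, hga, hgb]]
              by_cases hstart : start = -1
              · subst hstart
                rw [show stepA g (-1, cnt) i = (-1, cnt) by simp [stepA, hga, hgb],
                    ih _ _ hrest, if_pos rfl]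
                exact congrArg (fun t => cnt + t)
                  (pairSum_notdown_cons (i, '1') _ (by simp)).symm
              · rw [show stepA g (start, cnt) i = (-1, cnt + (i - start)) by
                      simp [stepA, hga, hgb, hstart],
                    ih _ _ hrest, if_pos rfl, if_neg hstart]
                show cnt + (i - start) + pairSum (rest.filterMap (clsB g))
                    = cnt + pairSum ((start, '0') :: (i, '1') :: rest.filterMap (clsB g))
                have : pairSum ((start, '0') :: (i, '1') :: rest.filterMap (clsB g))
                    = (i - start) + pairSum (rest.filterMap (clsB g)) := by
                  simp [pairSum]
                rw [this]; ring
            · rw [show stepA g (start, cnt) i = (start, cnt) by simp [stepA, hga, hgb, ha0],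
                  show clsB g i = none by simp [clsB, hga, hgb, ha0]]
              exact ih _ _ hrest
          · rw [show stepA g (start, cnt) i = (start, cnt) by simp [stepA, hga, hgb, hb0, hb1],
                show clsB g i = none by simp [clsB, hga, hgb, hb0, hb1]]
            exact ih _ _ hrest

-- ===== VERDICT (by name: the statement is the Claim_ definition above) =====
theorem solve_spec : Claim_equal_solve := by
  intro s _
  unfold Spec_solve solve solve_alt
  rw [loopA_eq]
  · simp
  · intro i hi
    have := (PySem.List.mem_pyRange_one.mp hi).1
    omega
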